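-- pv_equiv track=rewrite | github.com/tendertime/llm_test | rag_eval/extract_longbench_contexts.py | generate_python_list
-- ===== SOURCE A (Python) =====
-- def generate_python_list(documents, max_preview=3):
--     """生成 Python 列表代码"""
--     lines = ["DOCUMENTS = ["]
--
--     for i, doc in enumerate(documents):
--         # 转义引号和换行符
--         escaped_doc = doc.replace('\\', '\\\\').replace('"', '\\"').replace('\n', '\\n')
--
--         # 预览模式：只显示前几个
--         if max_preview > 0 and i < max_preview:
--             preview = escaped_doc[:100] + "..." if len(escaped_doc) > 100 else escaped_doc
--             lines.append(f'    "{preview}",')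
--         elif max_preview > 0:
--             # 只显示数量，不显示内容
--             lines.append(f'    # ... 还有 {len(documents) - max_preview} 个文档 ...')
--             break
--         else:
--             lines.append(f'    "{escaped_doc}",')
--
--     lines.append("]")
--     return '\n'.join(lines)
-- ===== SOURCE B (Python) =====
-- def generate_python_list(documents, max_preview=3):
--     """生成 Python 列表代码"""
--     _ESC = {'\\': '\\\\', '"': '\\"', '\n': '\\n'}
--
--     def esc(d):
--         # one pass over the characters instead of three .replace passes
--         return ''.join(_ESC.get(c, c) for c in d)
--
--     def line(d):
--         e = esc(d)
--         if max_preview > 0 and len(e) > 100: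
--             e = e[:100] + '...'
--         return '    "%s",' % e
--
--     n = len(documents)
--     shown = documents if max_preview <= 0 else documents[:max_preview]
--     # build the output back-to-front: footer, optional count line, doc lines, header
--     parts = [']']
--     if max_preview > 0 and n > max_preview:
--         parts.append('    # ... 还有 %d 个文档 ...' % (n - max_preview))
--     for d in reversed(shown):
--         parts.append(line(d))
--     parts.append('DOCUMENTS = [')
--     return '\n'.join(reversed(parts))
-- ===== Notes on version B (the rewrite author's own statement) =====
-- stated objective: alternative
-- what changed: B escapes each document in a single character-table pass instead of A's three sequential .replace passes, and assembles the output back-to-front (footer, optional count line, doc lines in reverse, header) instead of A's forward enumerate-loop with an in-loop branch and break.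
import Mathlib
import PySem

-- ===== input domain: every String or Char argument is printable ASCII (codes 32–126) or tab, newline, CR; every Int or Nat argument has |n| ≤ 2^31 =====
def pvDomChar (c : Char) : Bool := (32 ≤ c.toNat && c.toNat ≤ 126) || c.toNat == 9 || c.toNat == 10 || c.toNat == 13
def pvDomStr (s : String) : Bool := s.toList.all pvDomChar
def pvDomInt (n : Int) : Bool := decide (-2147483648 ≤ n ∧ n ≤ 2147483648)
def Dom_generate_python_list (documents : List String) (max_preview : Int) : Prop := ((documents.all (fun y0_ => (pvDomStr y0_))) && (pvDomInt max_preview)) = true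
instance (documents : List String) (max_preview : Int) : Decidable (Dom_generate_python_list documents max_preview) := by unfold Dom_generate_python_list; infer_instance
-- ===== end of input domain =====

-- B escapes each document in ONE character-table pass instead of A's three sequential .replace passes,
-- and assembles the output back-to-front (footer, optional count line, doc lines reversed, header); same value.

-- ===== PORT A =====
-- A's escaping: doc.replace('\\','\\\\').replace('"','\\"').replace('\n','\\n')
def pvEscapeA (doc : String) : String :=
  PySem.Str.replace (PySem.Str.replace (PySem.Str.replace doc "\\" "\\\\") "\"" "\\\"") "\n" "\\n"

-- A's for-loop over enumerate(documents) with an in-loop branch and break, as structural recursion with index i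
def pvALoop (max_preview total : Int) (i : Nat) : List String → List String
  | [] => []
  | doc :: rest =>
    let escaped := pvEscapeA doc
    if max_preview > 0 ∧ (i : Int) < max_preview then
      let preview := if PySem.Str.len escaped > 100 then PySem.Str.slice escaped none (some 100) ++ "..." else escaped
      ("    \"" ++ preview ++ "\",") :: pvALoop max_preview total (i + 1) rest
    else if max_preview > 0 then
      ["    # ... 还有 " ++ PySem.Int.toStr (total - max_preview) ++ " 个文档 ..."]  -- break
    else
      ("    \"" ++ escaped ++ "\",") :: pvALoop max_preview total (i + 1) rest

def generate_python_list (documents : List String) (max_preview : Int) : String :=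
  PySem.Str.join "\n" (["DOCUMENTS = ["] ++ pvALoop max_preview (documents.length : Int) 0 documents ++ ["]"])

-- ===== PORT B =====
-- B's escaping: the _ESC character table applied in one pass (''.join(_ESC.get(c, c) for c in d))
def pvEscChar (c : Char) : List Char :=
  if c = '\\' then ['\\', '\\'] else if c = '"' then ['\\', '"'] else if c = '\n' then ['\\', 'n'] else [c]

def pvEscapeB (d : String) : String := String.ofList (d.toList.flatMap pvEscChar)

def pvLineB (max_preview : Int) (d : String) : String :=
  "    \"" ++ (if max_preview > 0 ∧ PySem.Str.len (pvEscapeB d) > 100 then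
      PySem.Str.slice (pvEscapeB d) none (some 100) ++ "..." else pvEscapeB d) ++ "\","

def generate_python_list_alt (documents : List String) (max_preview : Int) : String :=
  PySem.Str.join "\n"
    (((if max_preview ≤ 0 then documents else PySem.List.slice documents none (some max_preview)).reverse.foldl
        (fun acc d => acc ++ [pvLineB max_preview d])
        (if max_preview > 0 ∧ (documents.length : Int) > max_preview then
          ["]"] ++ ["    # ... 还有 " ++ PySem.Int.toStr ((documents.length : Int) - max_preview) ++ " 个文档 ..."]
        else ["]"]) ++ ["DOCUMENTS = ["]).reverse)

-- ===== PRECONDITION & SPEC =====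
def Spec_generate_python_list (documents : List String) (max_preview : Int) (out : String) : Prop := out = generate_python_list_alt documents max_preview
instance (documents : List String) (max_preview : Int) (out : String) : Decidable (Spec_generate_python_list documents max_preview out) := by unfold Spec_generate_python_list; infer_instance

-- ===== CLAIM (what is proved, stated in full; the proofs are below) =====
def Claim_equal_generate_python_list : Prop := ∀ (documents : List String) (max_preview : Int), Dom_generate_python_list documents max_preview → Spec_generate_python_list documents max_preview (generate_python_list documents max_preview)

-- ===== LEMMAS AND PROOFS =====

-- single-character replace is a flatMap over the characters
theorem replace_go_single (o : Char) (new : List Char) :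
    ∀ (l acc : List Char) (fuel : Nat), l.length ≤ fuel →
      PySem.Chars.replace.go [o] new fuel l acc =
        acc.reverse ++ l.flatMap (fun c => if c = o then new else [c]) := by
  intro l
  induction l with
  | nil =>
    intro acc fuel _
    cases fuel <;> simp [PySem.Chars.replace.go]
  | cons c t ih =>
    intro acc fuel hf
    cases fuel with
    | zero => simp at hf
    | succ fuel =>
      simp only [PySem.Chars.replace.go]
      by_cases h : c = o
      · subst h
        rw [if_pos (by simp [List.isPrefixOf])]
        simp only [List.length_cons] at hf
        show PySem.Chars.replace.go [c] new fuel t (new.reverse ++ acc) = _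
        rw [ih _ fuel (by omega)]
        simp
      · rw [if_neg (by simp [List.isPrefixOf]; exact Ne.symm h)]
        simp only [List.length_cons] at hf
        rw [ih _ fuel (by omega)]
        simp [h]

theorem replace_single (s : List Char) (o : Char) (new : List Char) :
    PySem.Chars.replace s [o] new = s.flatMap (fun c => if c = o then new else [c]) := by
  rw [PySem.Chars.replace]
  rw [if_neg (by simp)]
  exact replace_go_single o new s [] s.length (le_refl _)

-- the three sequential replaces equal B's one-pass character table
theorem escape_eq (d : String) : pvEscapeA d = pvEscapeB d := by
  unfold pvEscapeA pvEscapeB PySem.Str.replace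
  simp only [String.toList_ofList]
  congr 1
  have h1 : ("\\" : String).toList = ['\\'] := by decide
  have h2 : ("\\\\" : String).toList = ['\\', '\\'] := by decide
  have h3 : ("\"" : String).toList = ['"'] := by decide
  have h4 : ("\\\"" : String).toList = ['\\', '"'] := by decide
  have h5 : ("\n" : String).toList = ['\n'] := by decide
  have h6 : ("\\n" : String).toList = ['\\', 'n'] := by decide
  rw [h1, h2, h3, h4, h5, h6]
  rw [replace_single, replace_single, replace_single, List.flatMap_assoc, List.flatMap_assoc]
  apply List.flatMap_congr
  intro c _
  by_cases h1 : c = '\\'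
  · subst h1; decide
  · by_cases h2 : c = '"'
    · subst h2; decide
    · by_cases h3 : c = '\n'
      · subst h3; decide
      · simp [pvEscChar, h1, h2, h3]

-- A's preview line equals pvLineB when max_preview > 0
theorem pvLine_eq (max_preview : Int) (h : 0 < max_preview) (d : String) :
    ("    \"" ++ (if PySem.Str.len (pvEscapeA d) > 100 then PySem.Str.slice (pvEscapeA d) none (some 100) ++ "..." else pvEscapeA d) ++ "\",") = pvLineB max_preview d := by
  unfold pvLineB
  rw [escape_eq]
  by_cases hc : PySem.Str.len (pvEscapeB d) > 100
  · rw [if_pos hc, if_pos (⟨h, hc⟩ : max_preview > 0 ∧ PySem.Str.len (pvEscapeB d) > 100)]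
  · rw [if_neg hc, if_neg (by tauto)]

-- the non-preview branch: A's loop = map, regardless of i
theorem pvALoop_nonpos (max_preview total : Int) (h : max_preview ≤ 0) :
    ∀ (docs : List String) (i : Nat),
      pvALoop max_preview total i docs = docs.map (pvLineB max_preview) := by
  intro docs
  induction docs with
  | nil => intro i; simp [pvALoop]
  | cons d rest ih =>
    intro i
    simp only [pvALoop, List.map_cons]
    rw [if_neg (by omega), if_neg (by omega), ih]
    unfold pvLineB
    rw [escape_eq, if_neg (by rintro ⟨h1, _⟩; omega)]

-- the preview branch: A's loop = formatted take ++ optional count line, for i ≤ max_preview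
theorem pvALoop_pos (max_preview total : Int) (h : 0 < max_preview) :
    ∀ (docs : List String) (i : Nat), (i : Int) ≤ max_preview →
      pvALoop max_preview total i docs =
        (docs.take (max_preview - i).toNat).map (pvLineB max_preview) ++
          (if max_preview < (i : Int) + docs.length then
            ["    # ... 还有 " ++ PySem.Int.toStr (total - max_preview) ++ " 个文档 ..."]
          else []) := by
  intro docs
  induction docs with
  | nil =>
    intro i hi
    simp [pvALoop]
    omega
  | cons d rest ih =>
    intro i hi
    by_cases hlt : (i : Int) < max_preview
    · have htn : (max_preview - i).toNat = (max_preview - (i + 1 : Nat)).toNat + 1 := by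
        push_cast; omega
      simp only [pvALoop, htn, List.take_succ_cons, List.map_cons]
      rw [if_pos (show max_preview > 0 ∧ (i : Int) < max_preview from ⟨h, hlt⟩)]
      rw [ih (i + 1) (by omega)]
      have hcond : (max_preview < (i : Int) + (d :: rest).length) ↔
          (max_preview < ((i + 1 : Nat) : Int) + rest.length) := by
        simp; omega
      rw [pvLine_eq max_preview h]
      by_cases hc : max_preview < ((i + 1 : Nat) : Int) + rest.length
      · rw [if_pos hc, if_pos (hcond.mpr hc)]; simp
      · rw [if_neg hc, if_neg (fun hx => hc (hcond.mp hx))]; simp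
    · have hieq : (i : Int) = max_preview := le_antisymm hi (le_of_not_gt hlt)
      simp only [pvALoop, if_neg (by omega : ¬ (max_preview > 0 ∧ (i : Int) < max_preview)), if_pos h]
      have : (max_preview - i).toNat = 0 := by omega
      rw [this]
      have : max_preview < (i : Int) + (d :: rest).length := by simp; omega
      rw [if_pos this]
      simp

-- B's back-to-front accumulation, unreversed
theorem foldl_snoc (f : String → String) :
    ∀ (l init : List String), l.foldl (fun acc d => acc ++ [f d]) init = init ++ l.map f := by
  intro l
  induction l with
  | nil => simp
  | cons d t ih => intro init; simp [List.foldl_cons, ih]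

-- ===== VERDICT (by name: the statement is the Claim_ definition above) =====
theorem generate_python_list_spec : Claim_equal_generate_python_list := by
  intro documents max_preview _
  unfold Spec_generate_python_list generate_python_list generate_python_list_alt
  rw [foldl_snoc]
  by_cases h : max_preview ≤ 0
  · rw [if_pos h, if_neg (by rintro ⟨h1, _⟩; omega), pvALoop_nonpos max_preview _ h]
    simp
  · have hpos : 0 < max_preview := by omega
    rw [if_neg h, pvALoop_pos max_preview _ hpos documents 0 (by omega)]
    simp only [PySem.List.slice_to _ (by omega : (0:Int) ≤ max_preview)]
    by_cases hc : (documents.length : Int) > max_preview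
    · rw [if_pos (⟨hpos, hc⟩ : max_preview > 0 ∧ (documents.length : Int) > max_preview),
        if_pos (show max_preview < ((0 : Nat) : Int) + documents.length by push_cast; omega)]
      simp
    · have hA : ¬ max_preview < ((0 : Nat) : Int) + documents.length := by omega
      have hB : ¬ (max_preview > 0 ∧ (documents.length : Int) > max_preview) := by tauto
      rw [if_neg hA, if_neg hB]
      simp
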